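-- pv_equiv track=rewrite | github.com/aiguy110/subset-sum-ordering | subset_sum_ordering.py | subset_sum_ordering
-- ===== SOURCE A (Python) =====
-- def subset_sum_ordering(nums):
--     """
--     Given a list of positive integers, returns (partition, radices).
--
--     partition: groups of the sorted input in ascending order. The last group
--                (largest elements) is the most significant position in the
--                mixed-radix scheme.
--     radices:   2^(group size) for each group -- the digit alphabet size per position.
--
--     Encoding a subset S as a digit tuple (d_0, ..., d_{k-1}), where d_i is the
--     rank (by group-sum) of the elements of S drawn from group i, produces a
--     total order over all subsets consistent with subset-sum ordering: if
--     sum(S1) < sum(S2) then lex(S1) < lex(S2) (comparing right-to-left, i.e.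
--     the last group is most significant).
--
--     Groups are cut greedily: a new group starts after element k when
--         sum(sorted[0..k]) < sorted[k+1]
--     This ensures no combination of elements from earlier groups can reach or
--     exceed any nonempty selection from a later group, making the digit at each
--     position unambiguously more significant than all positions to its left.
--     This is a generalisation of the super-increasing property: a fully
--     super-increasing sequence produces all singleton groups (pure binary encoding).
--     """
--     if not nums:
--         return [], []
--
--     sorted_nums = sorted(nums)
--     groups = []
--     current_group = []
--     prefix_sum = 0
--
--     for num in sorted_nums:
--         if current_group and prefix_sum < num:
--             groups.append(current_group)
--             current_group = []
--         current_group.append(num)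
--         prefix_sum += num
--
--     groups.append(current_group)
--     radices = [2 ** len(g) for g in groups]
--     return groups, radices
-- ===== SOURCE B (Python) =====
-- def subset_sum_ordering(nums):
--     if not nums:
--         return [], []
--     sn = sorted(nums)
--     pre = []
--     total = 0
--     for x in sn:
--         total += x
--         pre.append(total)
--     cuts = [i for i in range(1, len(sn)) if pre[i - 1] < sn[i]]
--     bounds = [0] + cuts + [len(sn)]
--     groups = [sn[a:b] for a, b in zip(bounds, bounds[1:])]
--     radices = [2 ** len(g) for g in groups]
--     return groups, radices
-- ===== Notes on version B (the rewrite author's own statement) =====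
-- stated objective: alternative
-- what changed: Replaces A's incremental group-growing fold (mutable current_group flushed on the fly) by an index-table decomposition: compute all prefix sums, collect the cut indices i where prefix[i-1] < sorted[i], then slice the sorted list at those boundaries and derive radices from the slices.
import Mathlib
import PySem

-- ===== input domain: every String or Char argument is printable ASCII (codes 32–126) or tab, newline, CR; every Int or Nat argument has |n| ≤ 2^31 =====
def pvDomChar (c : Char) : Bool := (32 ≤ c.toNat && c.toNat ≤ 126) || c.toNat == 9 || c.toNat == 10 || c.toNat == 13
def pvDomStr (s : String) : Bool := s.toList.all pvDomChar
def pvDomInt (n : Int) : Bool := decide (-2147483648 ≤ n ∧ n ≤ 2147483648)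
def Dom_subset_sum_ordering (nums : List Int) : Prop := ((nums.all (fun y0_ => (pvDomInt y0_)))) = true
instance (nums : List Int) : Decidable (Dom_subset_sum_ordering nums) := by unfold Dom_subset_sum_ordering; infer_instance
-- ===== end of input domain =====

-- B replaces A's incremental group-growing fold by a prefix-sum/cut-index/slice decomposition; same O(n log n) cost, alternative structure.


-- ===== PORT A =====
def subset_sum_ordering (nums : List Int) : List (List Int) × List Int :=
  if nums = [] then ([], [])
  else
    let sorted_nums := PySem.List.sorted nums (fun x => x) false
    let st := sorted_nums.foldl
      (fun (acc : List (List Int) × List Int × Int) num =>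
        if acc.2.1 ≠ [] ∧ acc.2.2 < num then (acc.1 ++ [acc.2.1], [num], acc.2.2 + num)
        else (acc.1, acc.2.1 ++ [num], acc.2.2 + num))
      ([], [], 0)
    let groups := st.1 ++ [st.2.1]
    (groups, groups.map (fun g => (2 : Int) ^ g.length))

-- ===== PORT B =====
def subset_sum_ordering_alt (nums : List Int) : List (List Int) × List Int :=
  if nums = [] then ([], [])
  else
    let sn := PySem.List.sorted nums (fun x => x) false
    let pre := (sn.foldl (fun (acc : List Int × Int) x => (acc.1 ++ [acc.2 + x], acc.2 + x)) ([], 0)).1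
    let cuts := (PySem.List.pyRange 1 (sn.length : Int) 1).filter
      (fun i => PySem.List.pyGetD pre (i - 1) 0 < PySem.List.pyGetD sn i 0)
    let bounds := (0 : Int) :: (cuts ++ [(sn.length : Int)])
    let groups := (bounds.zip bounds.tail).map (fun p => PySem.List.slice sn (some p.1) (some p.2))
    (groups, groups.map (fun g => (2 : Int) ^ g.length))

-- ===== PRECONDITION & SPEC =====
def Spec_subset_sum_ordering (nums : List Int) (out : List (List Int) × List Int) : Prop := out = subset_sum_ordering_alt nums
instance (nums : List Int) (out : List (List Int) × List Int) : Decidable (Spec_subset_sum_ordering nums out) := by unfold Spec_subset_sum_ordering; infer_instance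

-- ===== CLAIM (what is proved, stated in full; the proofs are below) =====
def Claim_equal_subset_sum_ordering : Prop := ∀ (nums : List Int), Dom_subset_sum_ordering nums → Spec_subset_sum_ordering nums (subset_sum_ordering nums)

-- ===== LEMMAS AND PROOFS =====

/-- A-side spec: the groups A's fold produces, as a structural recursion. -/
def groupsFrom (cur : List Int) (s : Int) : List Int → List (List Int)
  | [] => [cur]
  | x :: xs => if s < x then cur :: groupsFrom [x] (s + x) xs else groupsFrom (cur ++ [x]) (s + x) xs

/-- B-side spec: cut indices (relative, 0-based into the tail handled) as a recursion. -/
def cuts0 (s : Int) : List Int → List Nat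
  | [] => []
  | x :: xs => (if s < x then [0] else []) ++ (cuts0 (s + x) xs).map (· + 1)

/-- B-side spec: running prefix sums starting from s. -/
def preFrom (s : Int) : List Int → List Int
  | [] => []
  | x :: xs => (s + x) :: preFrom (s + x) xs

/-- Split a list at (relative) cut positions. -/
def chunks : List Int → List Nat → List (List Int)
  | xs, [] => [xs]
  | xs, c :: cs => xs.take c :: chunks (xs.drop c) (cs.map (· - c))
  termination_by _ cs => cs.length
  decreasing_by simp

theorem foldA_groupsFrom (xs : List Int) :
    ∀ (gs : List (List Int)) (cur : List Int) (s : Int), cur ≠ [] →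
    (xs.foldl
      (fun (acc : List (List Int) × List Int × Int) num =>
        if acc.2.1 ≠ [] ∧ acc.2.2 < num then (acc.1 ++ [acc.2.1], [num], acc.2.2 + num)
        else (acc.1, acc.2.1 ++ [num], acc.2.2 + num))
      (gs, cur, s)).1 ++
      [(xs.foldl
        (fun (acc : List (List Int) × List Int × Int) num =>
          if acc.2.1 ≠ [] ∧ acc.2.2 < num then (acc.1 ++ [acc.2.1], [num], acc.2.2 + num)
          else (acc.1, acc.2.1 ++ [num], acc.2.2 + num))
        (gs, cur, s)).2.1] = gs ++ groupsFrom cur s xs := by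
  induction xs with
  | nil => intro gs cur s h; simp [groupsFrom]
  | cons x xs ih =>
    intro gs cur s h
    rw [List.foldl_cons]
    by_cases hx : s < x
    · rw [if_pos (show cur ≠ [] ∧ s < x from ⟨h, hx⟩), ih (gs ++ [cur]) [x] (s + x) (by simp)]
      simp [groupsFrom, hx]
    · rw [if_neg (show ¬(cur ≠ [] ∧ s < x) from fun hc => hx hc.2),
        ih gs (cur ++ [x]) (s + x) (by simp)]
      simp [groupsFrom, hx]

theorem foldPre (xs : List Int) :
    ∀ (acc : List Int) (s : Int),
    (xs.foldl (fun (acc : List Int × Int) x => (acc.1 ++ [acc.2 + x], acc.2 + x)) (acc, s)).1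
      = acc ++ preFrom s xs := by
  induction xs with
  | nil => intro acc s; simp [preFrom]
  | cons x xs ih => intro acc s; simp only [List.foldl_cons, preFrom]; rw [ih]; simp

theorem filter_preFrom (t : List Int) :
    ∀ (s : Int),
    (List.range t.length).filter
      (fun k => decide ((s :: preFrom s t).getD k 0 < t.getD k 0)) = cuts0 s t := by
  induction t with
  | nil => intro s; simp [cuts0]
  | cons x xs ih =>
    intro s
    rw [List.length_cons, List.range_succ_eq_map, List.filter_cons]
    simp only [List.getD_cons_zero, preFrom]
    rw [List.filter_map]
    have : (List.filter (fun k => decide (((s + x) :: preFrom (s + x) xs).getD k 0 < xs.getD k 0))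
        (List.range xs.length)).map Nat.succ
        = ((cuts0 (s + x) xs).map Nat.succ) := by
      rw [ih (s + x)]
    by_cases hx : s < x
    · simp only [decide_eq_true hx, cuts0, if_pos hx]
      simp only [Function.comp_def, List.getD_cons_succ]
      rw [this]
      simp
    · simp only [decide_eq_false hx, cuts0, if_neg hx]
      simp only [Function.comp_def, List.getD_cons_succ]
      rw [this]
      simp

theorem cuts0_sorted (xs : List Int) : ∀ (s : Int), (cuts0 s xs).Pairwise (· < ·) := by
  induction xs with
  | nil => intro s; simp [cuts0]
  | cons x xs ih =>
    intro s
    simp only [cuts0]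
    rw [List.pairwise_append]
    refine ⟨?_, (List.pairwise_map).2 ((ih (s + x)).imp (by omega)), ?_⟩
    · split <;> simp
    · intro a ha b hb
      split at ha
      · simp at ha; subst ha; simp at hb; omega
      · simp at ha

theorem chunks_groupsFrom (xs : List Int) :
    ∀ (cur : List Int) (s : Int),
    chunks (cur ++ xs) ((cuts0 s xs).map (· + cur.length)) = groupsFrom cur s xs := by
  induction xs with
  | nil => intro cur s; simp [cuts0, chunks, groupsFrom]
  | cons x xs ih =>
    intro cur s
    by_cases hx : s < x
    · simp only [cuts0, if_pos hx, groupsFrom, List.map_append, List.map_map]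
      simp only [List.map_cons, List.map_nil, List.singleton_append, chunks, Nat.zero_add]
      rw [List.take_left', List.drop_left']
      · have hmap : ((cuts0 (s + x) xs).map ((· + cur.length) ∘ (· + 1))).map (· - cur.length)
            = (cuts0 (s + x) xs).map (· + 1) := by
          rw [List.map_map]; apply List.map_congr_left; intro a _; simp [Function.comp]
        rw [hmap]
        have := ih [x] (s + x)
        simpa using this
      · rfl
      · rfl
    · simp only [cuts0, groupsFrom, if_neg hx, List.nil_append, List.map_map]
      have hmap : (cuts0 (s + x) xs).map ((· + cur.length) ∘ (· + 1))
          = (cuts0 (s + x) xs).map (· + (cur ++ [x]).length) := by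
        apply List.map_congr_left; intro a _; simp [Function.comp]; omega
      rw [hmap, show cur ++ x :: xs = (cur ++ [x]) ++ xs by simp]
      exact ih (cur ++ [x]) (s + x)

theorem slices_chunks (cs : List Nat) :
    ∀ (a : Nat) (sn : List Int), (∀ c ∈ cs, a ≤ c) → cs.Pairwise (· ≤ ·) →
    (((a : Int) :: (cs.map (Nat.cast : Nat → Int) ++ [(sn.length : Int)])).zip
        ((cs.map (Nat.cast : Nat → Int) ++ [(sn.length : Int)]))).map
      (fun p => PySem.List.slice sn (some p.1) (some p.2))
      = chunks (sn.drop a) (cs.map (· - a)) := by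
  induction cs with
  | nil =>
    intro a sn _ _
    simp [chunks, PySem.List.slice_natCast, List.take_of_length_le]
  | cons c cs ih =>
    intro a sn hle hp
    have hac : a ≤ c := hle c (by simp)
    have hcs := List.pairwise_cons.1 hp
    simp only [List.map_cons, List.cons_append, List.zip_cons_cons, List.map_cons]
    rw [ih c sn hcs.1 hcs.2]
    have hdrop : (sn.drop a).drop (c - a) = sn.drop c := by
      rw [List.drop_drop]; congr 1; omega
    have hmap2 : ((cs.map (fun x => x - a)).map (fun x => x - (c - a))) = cs.map (fun x => x - c) := by
      rw [List.map_map]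
      apply List.map_congr_left
      intro d hd
      have hcd := hcs.1 d hd
      simp only [Function.comp]
      omega
    simp only [chunks, hdrop, hmap2, PySem.List.slice_natCast]

theorem groups_eq (nums : List Int) (h : nums ≠ []) :
    (subset_sum_ordering nums).1 = (subset_sum_ordering_alt nums).1 := by
  unfold subset_sum_ordering subset_sum_ordering_alt
  rw [if_neg h, if_neg h]
  have hlen : (PySem.List.sorted nums (fun x => x) false).length = nums.length :=
    PySem.List.length_sorted _ _ _
  obtain ⟨hd, t, hsn⟩ : ∃ hd t, PySem.List.sorted nums (fun x => x) false = hd :: t := by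
    cases hcase : PySem.List.sorted nums (fun x => x) false with
    | nil => exfalso; apply h; rw [hcase] at hlen; exact List.length_eq_zero_iff.1 hlen.symm
    | cons hd t => exact ⟨hd, t, rfl⟩
  simp only [hsn]
  -- A side
  have hA : ((hd :: t).foldl
      (fun (acc : List (List Int) × List Int × Int) num =>
        if acc.2.1 ≠ [] ∧ acc.2.2 < num then (acc.1 ++ [acc.2.1], [num], acc.2.2 + num)
        else (acc.1, acc.2.1 ++ [num], acc.2.2 + num))
      ([], [], 0)).1 ++ [((hd :: t).foldl
      (fun (acc : List (List Int) × List Int × Int) num =>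
        if acc.2.1 ≠ [] ∧ acc.2.2 < num then (acc.1 ++ [acc.2.1], [num], acc.2.2 + num)
        else (acc.1, acc.2.1 ++ [num], acc.2.2 + num))
      ([], [], 0)).2.1] = groupsFrom [hd] hd t := by
    rw [List.foldl_cons]
    norm_num
    exact foldA_groupsFrom t [] [hd] hd (by simp)
  -- B side: prefix sums
  have hpre : ((hd :: t).foldl (fun (acc : List Int × Int) x => (acc.1 ++ [acc.2 + x], acc.2 + x))
      ([], 0)).1 = hd :: preFrom hd t := by
    rw [foldPre]; simp [preFrom]
  -- B side: cuts
  have hcuts : (PySem.List.pyRange 1 ((hd :: t).length : Int) 1).filter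
      (fun i => PySem.List.pyGetD (hd :: preFrom hd t) (i - 1) 0 < PySem.List.pyGetD (hd :: t) i 0)
      = ((cuts0 hd t).map (· + 1)).map (Nat.cast : Nat → Int) := by
    rw [PySem.List.pyRange_one]
    have hlen2 : ((((hd :: t).length : Int)) - 1).toNat = t.length := by simp
    rw [hlen2, List.filter_map]
    have hfun : ((fun i => decide (PySem.List.pyGetD (hd :: preFrom hd t) (i - 1) 0 <
          PySem.List.pyGetD (hd :: t) i 0)) ∘ (fun k : Nat => (1 : Int) + k))
        = fun k : Nat => decide ((hd :: preFrom hd t).getD k 0 < t.getD k 0) := by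
      funext k
      have h1 : (1 : Int) + (k : Int) - 1 = (k : Int) := by ring
      have h2 : (1 : Int) + (k : Int) = ((k + 1 : Nat) : Int) := by push_cast; ring
      have h3 : ((k + 1 : Nat) : Int) - 1 = (k : Int) := by push_cast; ring
      simp only [Function.comp, h2, h3, PySem.List.pyGetD_natCast, List.getD_cons_succ]
    rw [hfun, filter_preFrom t hd]
    rw [List.map_map]
    apply List.map_congr_left
    intro a _
    simp [Function.comp]; ring
  simp only [hpre, hcuts, List.tail_cons]
  -- assemble with the slice lemma at a = 0
  have hs := slices_chunks ((cuts0 hd t).map (· + 1)) 0 (hd :: t)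
    (fun c _ => Nat.zero_le c)
    (by
      refine (List.pairwise_map).2 ?_
      exact ((cuts0_sorted t hd).imp (by omega)))
  simp only [Nat.cast_zero, List.drop_zero] at hs
  have hzero : ((cuts0 hd t).map (· + 1)).map (· - 0) = (cuts0 hd t).map (· + 1) := by simp
  rw [hzero] at hs
  have hchunks := chunks_groupsFrom t [hd] hd
  simp only [List.length_cons, List.length_nil, Nat.zero_add, List.singleton_append] at hchunks
  rw [hs, hchunks, ← hA]

-- ===== VERDICT (by name: the statement is the Claim_ definition above) =====
theorem subset_sum_ordering_spec : Claim_equal_subset_sum_ordering := by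
  intro nums _
  unfold Spec_subset_sum_ordering
  by_cases h : nums = []
  · subst h; rfl
  · have hg := groups_eq nums h
    have hA2 : (subset_sum_ordering nums).2
        = (subset_sum_ordering nums).1.map (fun g => (2 : Int) ^ g.length) := by
      unfold subset_sum_ordering; rw [if_neg h]
    have hB2 : (subset_sum_ordering_alt nums).2
        = (subset_sum_ordering_alt nums).1.map (fun g => (2 : Int) ^ g.length) := by
      unfold subset_sum_ordering_alt; rw [if_neg h]
    exact Prod.ext hg (by rw [hA2, hB2, hg])
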